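-- pv_equiv track=rewrite | github.com/julioagos/AdventOfCode | day10/part1.py | bfs
-- ===== SOURCE A (Python) =====
-- from collections import deque
--
-- def bfs(field, startX, startY):
--     # Directions for moving
--     directions = [
--         (-1, 0),
--         (1, 0),
--         (0, -1),
--         (0, 1)
--     ]
--
--     yLimit, xLimit = len(field), len(field[0])
--
--     # Initialize BFS queue and visited set
--     queue = deque([(startY, startX)])
--     visited = set([(startY, startX)])
--     sum = 0
--
--     # Start BFS
--     while queue:
--         y, x = queue.popleft()
--         # If we are at a 9, increment the count of reachable nines
--         if field[y][x] == 9: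
--             sum += 1
--             continue
--
--         # Explore the four possible directions
--         for y2, x2 in directions:
--             newY, newX = y + y2, x + x2
--             if 0 <= newY and newY < yLimit and 0 <= newX and newX < xLimit:
--                 if (newY, newX) not in visited:
--                     if field[newY][newX] == field[y][x] + 1:
--                         visited.add((newY, newX))
--                         queue.append((newY, newX))
--
--     return sum
-- ===== SOURCE B (Python) =====
-- def bfs(field, startX, startY):
--     # Level-synchronous climb: cells reachable at value v form one frontier set per
--     # value step, since every step increases the cell value by exactly 1.
--     frontier = {(startY, startX)}
--     for v in range(field[startY][startX] + 1, 10):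
--         frontier = {(y + dy, x + dx)
--                     for (y, x) in frontier
--                     for (dy, dx) in ((-1, 0), (1, 0), (0, -1), (0, 1))
--                     if 0 <= y + dy < len(field) and 0 <= x + dx < len(field[0])
--                     and field[y + dy][x + dx] == v}
--     return sum(1 for (y, x) in frontier if field[y][x] == 9)
-- ===== Notes on version B (the rewrite author's own statement) =====
-- stated objective: alternative
-- what changed: Replaces the queue-plus-visited-set BFS by a level-synchronous frontier climb: since every step raises the cell value by exactly 1, the cells reachable at value v form one set per value, so B folds a set-comprehension step over range(start_value+1, 10) and counts the 9s in the final frontier, with no queue and no global visited set.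
-- outside the precondition, e.g. on bfs([[9, 1], [0]], 0, 0): A returns 1, B returns 1
import Mathlib
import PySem

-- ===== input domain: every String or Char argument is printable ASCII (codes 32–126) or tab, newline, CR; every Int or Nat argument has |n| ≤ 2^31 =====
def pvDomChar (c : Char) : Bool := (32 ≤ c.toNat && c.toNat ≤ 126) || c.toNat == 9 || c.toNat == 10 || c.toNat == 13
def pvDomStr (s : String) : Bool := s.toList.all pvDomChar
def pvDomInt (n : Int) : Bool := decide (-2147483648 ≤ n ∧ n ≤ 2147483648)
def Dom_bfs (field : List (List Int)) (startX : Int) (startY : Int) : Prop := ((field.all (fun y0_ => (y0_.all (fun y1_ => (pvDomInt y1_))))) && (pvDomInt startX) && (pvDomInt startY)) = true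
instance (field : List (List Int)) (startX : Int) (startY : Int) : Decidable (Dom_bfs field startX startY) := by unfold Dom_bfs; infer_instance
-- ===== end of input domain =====

-- B replaces the queue-plus-visited BFS by a level-synchronous frontier climb over the values
-- start_value+1 .. 9 (an 'alternative' decomposition; return values proved equal on Pre_bfs).

-- ===== PORT A =====
-- field[y][x] (Python indexing, negative wrap; none = IndexError)
def pvGv (field : List (List Int)) (y x : Int) : Option Int :=
  (PySem.List.pyGet? field y).bind (fun row => PySem.List.pyGet? row x)

def pvDirs : List (Int × Int) := [(-1, 0), (1, 0), (0, -1), (0, 1)]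

-- the inner 'for y2, x2 in directions' loop of A
def pvExpand (field : List (List Int)) (yL xL y x v : Int) :
    List (Int × Int) → List (Int × Int) → List (Int × Int) → List (Int × Int) × List (Int × Int)
  | [], queue, visited => (queue, visited)
  | (dy, dx) :: ds, queue, visited =>
    if 0 ≤ y + dy ∧ y + dy < yL ∧ 0 ≤ x + dx ∧ x + dx < xL then
      if (y + dy, x + dx) ∈ visited then pvExpand field yL xL y x v ds queue visited
      else if pvGv field (y + dy) (x + dx) = some (v + 1) then
        pvExpand field yL xL y x v ds (queue ++ [(y + dy, x + dx)]) (visited ++ [(y + dy, x + dx)])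
      else pvExpand field yL xL y x v ds queue visited
    else pvExpand field yL xL y x v ds queue visited

-- the 'while queue' loop of A; fuel only makes the recursion structural and is chosen ≥ the
-- number of loop iterations (each iteration pops one of the ≤ yL*xL + 1 ever-enqueued cells)
def pvBfsLoop (field : List (List Int)) (yL xL : Int) :
    Nat → List (Int × Int) → List (Int × Int) → Int → Int
  | 0, _, _, s => s                       -- never reached: fuel ≥ iteration count
  | _ + 1, [], _, s => s
  | fuel + 1, (y, x) :: rest, visited, s =>
    match pvGv field y x with
    | none => s                           -- Python raises IndexError here; excluded by Pre_bfs
    | some v =>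
      if v = 9 then pvBfsLoop field yL xL fuel rest visited (s + 1)
      else
        let p := pvExpand field yL xL y x v pvDirs rest visited
        pvBfsLoop field yL xL fuel p.1 p.2 s

def bfs (field : List (List Int)) (startX : Int) (startY : Int) : Int :=
  match PySem.List.pyGet? field 0 with
  | none => 0                             -- Python raises IndexError (empty field); excluded by Pre_bfs
  | some row0 =>
    pvBfsLoop field field.length row0.length (2 * (field.length * row0.length) + 2)
      [(startY, startX)] [(startY, startX)] 0

-- ===== PORT B =====
-- the set comprehension building the next frontier (Python set built in iteration order)
def pvNextLayer (field : List (List Int)) (frontier : List (Int × Int)) (v : Int) :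
    List (Int × Int) :=
  frontier.foldl
    (fun acc c =>
      pvDirs.foldl
        (fun acc d =>
          if 0 ≤ c.1 + d.1 ∧ c.1 + d.1 < (field.length : Int) ∧ 0 ≤ c.2 + d.2 ∧
              c.2 + d.2 < ((field.headD []).length : Int) ∧
              pvGv field (c.1 + d.1) (c.2 + d.2) = some v
          then PySem.Set.add acc (c.1 + d.1, c.2 + d.2) else acc)
        acc)
    []

def bfs_alt (field : List (List Int)) (startX : Int) (startY : Int) : Int :=
  match pvGv field startY startX with
  | none => 0                             -- Python raises IndexError; excluded by Pre_bfs
  | some v0 =>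
    let frontier :=
      (PySem.List.pyRange (v0 + 1) 10 1).foldl (pvNextLayer field) [(startY, startX)]
    frontier.foldl (fun s c => if pvGv field c.1 c.2 = some 9 then s + 1 else s) 0

-- ===== PRECONDITION & SPEC =====
-- Pre_bfs excludes: the empty grid and out-of-range start cells (A raises IndexError), and
-- grids having a row shorter than row 0, on which A raises IndexError whenever the search
-- probes the missing cells (grids where A happens not to reach a short row are excluded too).
def Pre_bfs (field : List (List Int)) (startX : Int) (startY : Int) : Prop :=
  field ≠ [] ∧ (∀ row ∈ field, (field.headD []).length ≤ row.length) ∧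
    (pvGv field startY startX).isSome = true
instance (field : List (List Int)) (startX : Int) (startY : Int) :
    Decidable (Pre_bfs field startX startY) := by unfold Pre_bfs; infer_instance

def pvWitness_bfs : List (List Int) × Int × Int := ([[0, 1, 2], [1, 2, 3]], 0, 0)

def Spec_bfs (field : List (List Int)) (startX : Int) (startY : Int) (out : Int) : Prop := out = bfs_alt field startX startY
instance (field : List (List Int)) (startX : Int) (startY : Int) (out : Int) : Decidable (Spec_bfs field startX startY out) := by unfold Spec_bfs; infer_instance

-- ===== CLAIM (what is proved, stated in full; the proofs are below) =====
def Claim_equal_bfs : Prop := ∀ (field : List (List Int)) (startX : Int) (startY : Int), Dom_bfs field startX startY → Pre_bfs field startX startY → Spec_bfs field startX startY (bfs field startX startY)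

-- ===== LEMMAS AND PROOFS =====

-- cells of the grid reachable by the guarded moves
def pvInb (yL xL : Int) (c : Int × Int) : Prop := 0 ≤ c.1 ∧ c.1 < yL ∧ 0 ≤ c.2 ∧ c.2 < xL

noncomputable def pvAll (yL xL : Int) : Finset (Int × Int) := Finset.Icc 0 (yL - 1) ×ˢ Finset.Icc 0 (xL - 1)

lemma mem_pvAll {yL xL : Int} {c : Int × Int} : c ∈ pvAll yL xL ↔ pvInb yL xL c := by
  simp [pvAll, pvInb, Finset.mem_product, Finset.mem_Icc]; omega

def pvAdjB (c c' : Int × Int) : Bool := pvDirs.any (fun d => c' = (c.1 + d.1, c.2 + d.2))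

-- the full next layer generated from a set F at value w
noncomputable def pvStep (field : List (List Int)) (yL xL w : Int) (F : Finset (Int × Int)) :
    Finset (Int × Int) :=
  (pvAll yL xL).filter
    (fun c' => (∃ c ∈ F, pvAdjB c c' = true) ∧ pvGv field c'.1 c'.2 = some w)

-- number of 9-cells reached by climbing layers from layer F at value v
noncomputable def pvClimb (field : List (List Int)) (yL xL : Int) (v : Int) (F : Finset (Int × Int)) : Int :=
  if v = 9 then F.card
  else if 9 < v then 0
  else pvClimb field yL xL (v + 1) (pvStep field yL xL (v + 1) F)
termination_by (9 - v).toNat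
decreasing_by omega

lemma mem_pvStep {field : List (List Int)} {yL xL w : Int} {F : Finset (Int × Int)}
    {c' : Int × Int} :
    c' ∈ pvStep field yL xL w F ↔
      pvInb yL xL c' ∧ (∃ c ∈ F, ∃ d ∈ pvDirs, c' = (c.1 + d.1, c.2 + d.2)) ∧
        pvGv field c'.1 c'.2 = some w := by
  simp only [pvStep, Finset.mem_filter, mem_pvAll, pvAdjB, List.any_eq_true,
    decide_eq_true_eq]

lemma pvStep_empty (field : List (List Int)) (yL xL w : Int) :
    pvStep field yL xL w (∅ : Finset (Int × Int)) = ∅ := by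
  ext c; simp [mem_pvStep]

lemma pvClimb_gt {field : List (List Int)} {yL xL v : Int} (h : 9 < v)
    (F : Finset (Int × Int)) : pvClimb field yL xL v F = 0 := by
  rw [pvClimb, if_neg (by omega), if_pos h]

lemma pvClimb_empty (field : List (List Int)) (yL xL : Int) (v : Int) :
    pvClimb field yL xL v (∅ : Finset (Int × Int)) = 0 := by
  rw [pvClimb]
  split_ifs with h1 h2
  · simp
  · rfl
  · rw [pvStep_empty]; exact pvClimb_empty field yL xL (v + 1)
termination_by (9 - v).toNat
decreasing_by omega

-- what the inner direction loop of A produces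
lemma pvExpand_spec (field : List (List Int)) (yL xL y x v : Int) :
    ∀ (ds : List (Int × Int)) (queue visited : List (Int × Int)),
    ∃ new : List (Int × Int),
      pvExpand field yL xL y x v ds queue visited = (queue ++ new, visited ++ new) ∧
      new.Nodup ∧
      (∀ c ∈ new, c ∉ visited ∧ pvInb yL xL c ∧ pvGv field c.1 c.2 = some (v + 1) ∧
        ∃ d ∈ ds, c = (y + d.1, x + d.2)) ∧
      (∀ d ∈ ds, ∀ c : Int × Int, c = (y + d.1, x + d.2) → pvInb yL xL c →
        pvGv field c.1 c.2 = some (v + 1) → c ∈ visited ∨ c ∈ new) := by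
  intro ds
  induction ds with
  | nil =>
    intro queue visited
    exact ⟨[], by simp [pvExpand], List.nodup_nil, by simp, by simp⟩
  | cons d ds ih =>
    obtain ⟨dy, dx⟩ := d
    intro queue visited
    by_cases hb : 0 ≤ y + dy ∧ y + dy < yL ∧ 0 ≤ x + dx ∧ x + dx < xL
    · by_cases hv : (y + dy, x + dx) ∈ visited
      · obtain ⟨new, heq, hnd, hprop, hcomp⟩ := ih queue visited
        refine ⟨new, by simp [pvExpand, hb, hv, heq], hnd, ?_, ?_⟩
        · intro c hc
          obtain ⟨h1, h2, h3, d, hd, he⟩ := hprop c hc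
          exact ⟨h1, h2, h3, d, List.mem_cons_of_mem _ hd, he⟩
        · intro d hd c hce hinb hgv
          rcases List.mem_cons.mp hd with hd | hd
          · subst hd; subst hce; exact Or.inl hv
          · exact hcomp d hd c hce hinb hgv
      · by_cases hg : pvGv field (y + dy) (x + dx) = some (v + 1)
        · obtain ⟨new, heq, hnd, hprop, hcomp⟩ :=
            ih (queue ++ [(y + dy, x + dx)]) (visited ++ [(y + dy, x + dx)])
          refine ⟨(y + dy, x + dx) :: new, ?_, ?_, ?_, ?_⟩
          · simp only [pvExpand, if_pos hb, if_neg hv, if_pos hg, heq]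
            simp
          · refine List.nodup_cons.mpr ⟨fun hmem => ?_, hnd⟩
            exact (hprop _ hmem).1 (by simp)
          · intro c hc
            rcases List.mem_cons.mp hc with hc | hc
            · subst hc
              exact ⟨hv, by simpa [pvInb] using hb, hg, (dy, dx), by simp, rfl⟩
            · obtain ⟨h1, h2, h3, d, hd, he⟩ := hprop c hc
              exact ⟨fun hm => h1 (by simp [hm]), h2, h3, d,
                List.mem_cons_of_mem _ hd, he⟩
          · intro d hd c hce hinb hgv
            rcases List.mem_cons.mp hd with hd | hd
            · subst hd; exact Or.inr (by simp [hce])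
            · rcases hcomp d hd c hce hinb hgv with hmem | hmem
              · rcases List.mem_append.mp hmem with h | h
                · exact Or.inl h
                · exact Or.inr (by simp at h; simp [h])
              · exact Or.inr (List.mem_cons_of_mem _ hmem)
        · obtain ⟨new, heq, hnd, hprop, hcomp⟩ := ih queue visited
          refine ⟨new, by simp [pvExpand, hb, hv, hg, heq], hnd, ?_, ?_⟩
          · intro c hc
            obtain ⟨h1, h2, h3, d, hd, he⟩ := hprop c hc
            exact ⟨h1, h2, h3, d, List.mem_cons_of_mem _ hd, he⟩
          · intro d hd c hce hinb hgv
            rcases List.mem_cons.mp hd with hd | hd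
            · exfalso; apply hg; rw [hd] at hce; subst hce; exact hgv
            · exact hcomp d hd c hce hinb hgv
    · obtain ⟨new, heq, hnd, hprop, hcomp⟩ := ih queue visited
      refine ⟨new, by simp [pvExpand, hb, heq], hnd, ?_, ?_⟩
      · intro c hc
        obtain ⟨h1, h2, h3, d, hd, he⟩ := hprop c hc
        exact ⟨h1, h2, h3, d, List.mem_cons_of_mem _ hd, he⟩
      · intro d hd c hce hinb hgv
        rcases List.mem_cons.mp hd with hd | hd
        · exfalso; apply hb; rw [hd] at hce; subst hce
          simpa [pvInb] using hinb
        · exact hcomp d hd c hce hinb hgv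

lemma pv_card_sdiff {yL xL : Int} {vis new : List (Int × Int)}
    (hnd : new.Nodup) (hsub : ∀ c ∈ new, pvInb yL xL c) (hdis : ∀ c ∈ new, c ∉ vis) :
    (pvAll yL xL \ (vis ++ new).toFinset).card + new.length
      = (pvAll yL xL \ vis.toFinset).card := by
  have h1 : (vis ++ new).toFinset = vis.toFinset ∪ new.toFinset := List.toFinset_append
  have h2 : pvAll yL xL \ (vis.toFinset ∪ new.toFinset)
      = (pvAll yL xL \ vis.toFinset) \ new.toFinset := by
    ext c; simp only [Finset.mem_sdiff, Finset.mem_union]; tauto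
  have h3 : new.toFinset ⊆ pvAll yL xL \ vis.toFinset := by
    intro c hc
    rw [List.mem_toFinset] at hc
    rw [Finset.mem_sdiff, mem_pvAll]
    exact ⟨hsub c hc, fun h => hdis c hc (by simpa using h)⟩
  have h4 := Finset.card_le_card h3
  rw [List.toFinset_card_of_nodup hnd] at h4
  have h5 := Finset.card_sdiff_add_card_eq_card h3
  rw [List.toFinset_card_of_nodup hnd] at h5
  rw [h1, h2]
  omega

-- the loop when every queued cell is a 9 (the terminal layer)
lemma pvLoop_nines (field : List (List Int)) (yL xL : Int) :
    ∀ (q : List (Int × Int)) (fuel : Nat) (vis : List (Int × Int)) (s : Int),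
      (∀ c ∈ q, pvGv field c.1 c.2 = some 9) → q.length < fuel →
      pvBfsLoop field yL xL fuel q vis s = s + q.length := by
  intro q
  induction q with
  | nil =>
    intro fuel vis s _ hf
    match fuel, hf with
    | fuel + 1, _ => simp [pvBfsLoop]
  | cons c rest ih =>
    obtain ⟨y, x⟩ := c
    intro fuel vis s h9 hf
    match fuel, hf with
    | fuel + 1, hf =>
      have hg : pvGv field y x = some 9 := h9 (y, x) (by simp)
      simp only [pvBfsLoop, hg]
      rw [ih fuel vis (s + 1) (fun c hc => h9 c (List.mem_cons_of_mem _ hc))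
        (by simp at hf ⊢; omega)]
      simp; ring

-- the BFS loop invariant: queue = unprocessed rest of layer v (q1) ++ discovered part of
-- layer v+1 (q2); P is the processed part of layer v
def pvStmt (field : List (List Int)) (yL xL : Int) (fuel : Nat) : Prop :=
  ∀ (v : Int) (q1 q2 vis : List (Int × Int)) (P : Finset (Int × Int)) (s : Int),
    v ≠ 9 →
    (∀ c ∈ q1, pvGv field c.1 c.2 = some v) →
    q1.Nodup →
    (∀ c ∈ q1, c ∉ P) →
    q2.toFinset = pvStep field yL xL (v + 1) P →
    q2.Nodup →
    (∀ c ∈ vis, pvGv field c.1 c.2 = some (v + 1) → c ∈ q2) →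
    (∀ c ∈ q2, c ∈ vis) →
    (∀ c ∈ vis, ∃ w, w ≤ v + 1 ∧ pvGv field c.1 c.2 = some w) →
    2 * ((pvAll yL xL) \ vis.toFinset).card + q1.length + q2.length < fuel →
    pvBfsLoop field yL xL fuel (q1 ++ q2) vis s = s + pvClimb field yL xL v (P ∪ q1.toFinset)

-- processing the head of the current layer
lemma pvLoop_head (field : List (List Int)) (yL xL : Int) (f : Nat)
    (IH : pvStmt field yL xL f) :
    ∀ (v : Int) (c : Int × Int) (rest q2 vis : List (Int × Int)) (P : Finset (Int × Int))
      (s : Int),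
    v ≠ 9 →
    (∀ c' ∈ c :: rest, pvGv field c'.1 c'.2 = some v) →
    (c :: rest).Nodup →
    (∀ c' ∈ c :: rest, c' ∉ P) →
    q2.toFinset = pvStep field yL xL (v + 1) P →
    q2.Nodup →
    (∀ c' ∈ vis, pvGv field c'.1 c'.2 = some (v + 1) → c' ∈ q2) →
    (∀ c' ∈ q2, c' ∈ vis) →
    (∀ c' ∈ vis, ∃ w, w ≤ v + 1 ∧ pvGv field c'.1 c'.2 = some w) →
    2 * ((pvAll yL xL) \ vis.toFinset).card + (c :: rest).length + q2.length < f + 1 →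
    pvBfsLoop field yL xL (f + 1) ((c :: rest) ++ q2) vis s
      = s + pvClimb field yL xL v (P ∪ (c :: rest).toFinset) := by
  intro v c rest q2 vis P s h9 h1 hnd1 hP hq2 hnd2 hvisq2 hq2vis hvisle hfuel
  obtain ⟨y, x⟩ := c
  have hgv : pvGv field y x = some v := h1 (y, x) (by simp)
  rw [List.cons_append]
  simp only [pvBfsLoop, hgv]
  rw [if_neg h9]
  obtain ⟨new, heq, hndnew, hprop, hcomp⟩ :=
    pvExpand_spec field yL xL y x v pvDirs (rest ++ q2) vis
  rw [heq]
  show pvBfsLoop field yL xL f (rest ++ q2 ++ new) (vis ++ new) s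
    = s + pvClimb field yL xL v (P ∪ ((y, x) :: rest).toFinset)
  rw [List.append_assoc]
  have hyp4 : (q2 ++ new).toFinset = pvStep field yL xL (v + 1) (insert (y, x) P) := by
    ext z
    rw [List.toFinset_append, Finset.mem_union, mem_pvStep]
    constructor
    · rintro (hz | hz)
      · rw [hq2, mem_pvStep] at hz
        obtain ⟨hinb, ⟨c0, hc0, d, hd, he⟩, hgz⟩ := hz
        exact ⟨hinb, ⟨c0, Finset.mem_insert_of_mem hc0, d, hd, he⟩, hgz⟩
      · rw [List.mem_toFinset] at hz
        obtain ⟨hnvis, hinb, hgz, d, hd, he⟩ := hprop z hz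
        exact ⟨hinb, ⟨(y, x), Finset.mem_insert_self _ _, d, hd, he⟩, hgz⟩
    · rintro ⟨hinb, ⟨c0, hc0, d, hd, he⟩, hgz⟩
      rcases Finset.mem_insert.mp hc0 with hc0 | hc0
      · subst hc0
        rcases hcomp d hd z he hinb hgz with hz | hz
        · exact Or.inl (List.mem_toFinset.mpr (hvisq2 z hz hgz))
        · exact Or.inr (List.mem_toFinset.mpr hz)
      · refine Or.inl ?_
        rw [hq2]
        exact mem_pvStep.mpr ⟨hinb, ⟨c0, hc0, d, hd, he⟩, hgz⟩
  rw [IH v rest (q2 ++ new) (vis ++ new) (insert (y, x) P) s h9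
    (fun c' hc' => h1 c' (List.mem_cons_of_mem _ hc'))
    (List.nodup_cons.mp hnd1).2
    (fun c' hc' => by
      rw [Finset.mem_insert]
      push Not
      exact ⟨fun he => (List.nodup_cons.mp hnd1).1 (he ▸ hc'),
        hP c' (List.mem_cons_of_mem _ hc')⟩)
    hyp4
    (List.nodup_append.mpr ⟨hnd2, hndnew, by
      intro z hz1 w hw hzw
      subst hzw
      exact (hprop z hw).1 (hq2vis z hz1)⟩)
    (fun c' hc' hg => by
      rcases List.mem_append.mp hc' with h | h
      · exact List.mem_append.mpr (Or.inl (hvisq2 c' h hg))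
      · exact List.mem_append.mpr (Or.inr h))
    (fun c' hc' => by
      rcases List.mem_append.mp hc' with h | h
      · exact List.mem_append.mpr (Or.inl (hq2vis c' h))
      · exact List.mem_append.mpr (Or.inr h))
    (fun c' hc' => by
      rcases List.mem_append.mp hc' with h | h
      · exact hvisle c' h
      · exact ⟨v + 1, le_refl _, (hprop c' h).2.2.1⟩)
    (by
      have hcard := pv_card_sdiff (yL := yL) (xL := xL) (vis := vis) hndnew
        (fun c' hc' => (hprop c' hc').2.1) (fun c' hc' => (hprop c' hc').1)
      rw [List.length_append]
      simp only [List.length_cons] at hfuel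
      omega)]
  have hset : insert (y, x) P ∪ rest.toFinset = P ∪ ((y, x) :: rest).toFinset := by
    ext z; simp only [Finset.mem_union, Finset.mem_insert, List.toFinset_cons]
    simp; tauto
  rw [hset]

lemma pvLoop_eval (field : List (List Int)) (yL xL : Int) :
    ∀ fuel : Nat, pvStmt field yL xL fuel := by
  intro fuel
  induction fuel with
  | zero =>
    intro v q1 q2 vis P s _ _ _ _ _ _ _ _ _ hfuel
    omega
  | succ f IH =>
    intro v q1 q2 vis P s h9 h1 hnd1 hP hq2 hnd2 hvisq2 hq2vis hvisle hfuel
    have hq2mem : ∀ c' ∈ q2, pvGv field c'.1 c'.2 = some (v + 1) := fun c' hc' =>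
      (mem_pvStep.mp (hq2 ▸ List.mem_toFinset.mpr hc')).2.2
    cases q1 with
    | cons c rest =>
      exact pvLoop_head field yL xL f IH v c rest q2 vis P s h9 h1 hnd1 hP hq2 hnd2
        hvisq2 hq2vis hvisle hfuel
    | nil =>
      cases q2 with
      | nil =>
        have hstep : pvStep field yL xL (v + 1) P = ∅ := by
          rw [← hq2]; simp
        have hcl : pvClimb field yL xL v (P ∪ ([] : List (Int × Int)).toFinset) = 0 := by
          simp only [List.toFinset_nil, Finset.union_empty]
          rw [pvClimb, if_neg h9]
          split_ifs with h
          · rfl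
          · rw [hstep]; exact pvClimb_empty field yL xL (v + 1)
        rw [List.nil_append]
        show pvBfsLoop field yL xL (f + 1) [] vis s = _
        rw [hcl]
        simp [pvBfsLoop]
      | cons c q2rest =>
        by_cases hv9 : v + 1 = 9
        · have h9s : ∀ c' ∈ c :: q2rest, pvGv field c'.1 c'.2 = some 9 := fun c' hc' => by
            rw [← hv9]; exact hq2mem c' hc'
          rw [List.nil_append]
          rw [pvLoop_nines field yL xL (c :: q2rest) (f + 1) vis s h9s
            (by
              have hlen : (c :: q2rest).length = q2rest.length + 1 := rfl
              have hnil : ([] : List (Int × Int)).length = 0 := rfl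
              omega)]
          have hcard : (pvStep field yL xL (v + 1) P).card = (c :: q2rest).length := by
            rw [← hq2, List.toFinset_card_of_nodup hnd2]
          have hcl : pvClimb field yL xL v (P ∪ ([] : List (Int × Int)).toFinset)
              = ((c :: q2rest).length : Int) := by
            simp only [List.toFinset_nil, Finset.union_empty]
            rw [pvClimb, if_neg h9, if_neg (by omega)]
            rw [pvClimb, if_pos hv9, hcard]
          rw [hcl]
        · have h1' : ∀ c' ∈ c :: q2rest, pvGv field c'.1 c'.2 = some (v + 1) := hq2mem
          have hres := pvLoop_head field yL xL f IH (v + 1) c q2rest [] vis ∅ s hv9 h1'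
            hnd2 (by simp)
            (by simp [pvStep_empty])
            List.nodup_nil
            (fun c' hc' hg => by
              obtain ⟨w, hw, hgw⟩ := hvisle c' hc'
              rw [hgw] at hg
              exact absurd (Option.some.inj hg) (by omega))
            (by simp)
            (fun c' hc' => by
              obtain ⟨w, hw, hgw⟩ := hvisle c' hc'
              exact ⟨w, by omega, hgw⟩)
            (by
              have hlen : (c :: q2rest).length = q2rest.length + 1 := rfl
              simp only [List.length_nil] at hfuel
              simp only [List.length_cons, List.length_nil]
              omega)
          rw [List.nil_append, ← List.append_nil (c :: q2rest), hres]
          have hcl : pvClimb field yL xL v (P ∪ ([] : List (Int × Int)).toFinset)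
              = pvClimb field yL xL (v + 1) (∅ ∪ (c :: q2rest).toFinset) := by
            simp only [List.toFinset_nil, Finset.union_empty, Finset.empty_union]
            by_cases hgt : 9 < v
            · rw [pvClimb_gt hgt, pvClimb_gt (by omega)]
            · rw [pvClimb, if_neg h9, if_neg hgt, hq2]
          rw [hcl]

-- ===== B-side lemmas =====

-- the body of the set comprehension, named for the proofs
def pvStepFn (field : List (List Int)) (v : Int) (c : Int × Int)
    (acc : List (Int × Int)) (d : Int × Int) : List (Int × Int) :=
  if 0 ≤ c.1 + d.1 ∧ c.1 + d.1 < (field.length : Int) ∧ 0 ≤ c.2 + d.2 ∧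
      c.2 + d.2 < ((field.headD []).length : Int) ∧
      pvGv field (c.1 + d.1) (c.2 + d.2) = some v
  then PySem.Set.add acc (c.1 + d.1, c.2 + d.2) else acc

lemma pvInner_spec (field : List (List Int)) (v : Int) (c : Int × Int) :
    ∀ (ds acc : List (Int × Int)), acc.Nodup →
      (ds.foldl (pvStepFn field v c) acc).Nodup ∧
      ∀ x : Int × Int,
        x ∈ ds.foldl (pvStepFn field v c) acc ↔ x ∈ acc ∨
          ∃ d ∈ ds, x = (c.1 + d.1, c.2 + d.2) ∧
            pvInb (field.length : Int) ((field.headD []).length : Int) x ∧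
            pvGv field x.1 x.2 = some v := by
  intro ds
  induction ds with
  | nil => intro acc hnd; exact ⟨hnd, by simp⟩
  | cons d ds ih =>
    intro acc hnd
    by_cases hc : 0 ≤ c.1 + d.1 ∧ c.1 + d.1 < (field.length : Int) ∧ 0 ≤ c.2 + d.2 ∧
        c.2 + d.2 < ((field.headD []).length : Int) ∧
        pvGv field (c.1 + d.1) (c.2 + d.2) = some v
    · have hstep : pvStepFn field v c acc d = PySem.Set.add acc (c.1 + d.1, c.2 + d.2) := by
        unfold pvStepFn; rw [if_pos hc]
      obtain ⟨hnd', hmem⟩ := ih (PySem.Set.add acc (c.1 + d.1, c.2 + d.2))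
        (PySem.Set.nodup_add _ _ hnd)
      refine ⟨by simpa [List.foldl_cons, hstep] using hnd', fun x => ?_⟩
      rw [List.foldl_cons, hstep, hmem x]
      rw [PySem.Set.mem_add]
      constructor
      · rintro ((hx | hx) | ⟨d', hd', he⟩)
        · exact Or.inl hx
        · exact Or.inr ⟨d, by simp, by
            subst hx
            exact ⟨rfl, by
              unfold pvInb
              exact ⟨hc.1, hc.2.1, hc.2.2.1, hc.2.2.2.1⟩, hc.2.2.2.2⟩⟩
        · exact Or.inr ⟨d', List.mem_cons_of_mem _ hd', he⟩
      · rintro (hx | ⟨d', hd', he⟩)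
        · exact Or.inl (Or.inl hx)
        · rcases List.mem_cons.mp hd' with hd' | hd'
          · subst hd'; exact Or.inl (Or.inr he.1)
          · exact Or.inr ⟨d', hd', he⟩
    · have hstep : pvStepFn field v c acc d = acc := by
        unfold pvStepFn; rw [if_neg hc]
      obtain ⟨hnd', hmem⟩ := ih acc hnd
      refine ⟨by simpa [List.foldl_cons, hstep] using hnd', fun x => ?_⟩
      rw [List.foldl_cons, hstep, hmem x]
      constructor
      · rintro (hx | ⟨d', hd', he⟩)
        · exact Or.inl hx
        · exact Or.inr ⟨d', List.mem_cons_of_mem _ hd', he⟩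
      · rintro (hx | ⟨d', hd', he⟩)
        · exact Or.inl hx
        · rcases List.mem_cons.mp hd' with hd' | hd'
          · exfalso
            subst hd'
            obtain ⟨he1, he2, he3⟩ := he
            apply hc
            subst he1
            simp only [pvInb] at he2
            exact ⟨he2.1, he2.2.1, he2.2.2.1, he2.2.2.2, he3⟩
          · exact Or.inr ⟨d', hd', he⟩

lemma pvNextLayer_spec (field : List (List Int)) (v : Int) (F : List (Int × Int)) :
    (pvNextLayer field F v).Nodup ∧
    ∀ c' : Int × Int,
      c' ∈ pvNextLayer field F v ↔
        ∃ c ∈ F, ∃ d ∈ pvDirs, c' = (c.1 + d.1, c.2 + d.2) ∧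
          pvInb (field.length : Int) ((field.headD []).length : Int) c' ∧
          pvGv field c'.1 c'.2 = some v := by
  have key : ∀ (G acc : List (Int × Int)), acc.Nodup →
      (G.foldl (fun acc c => pvDirs.foldl (pvStepFn field v c) acc) acc).Nodup ∧
      ∀ x : Int × Int,
        x ∈ G.foldl (fun acc c => pvDirs.foldl (pvStepFn field v c) acc) acc ↔
          x ∈ acc ∨ ∃ c ∈ G, ∃ d ∈ pvDirs, x = (c.1 + d.1, c.2 + d.2) ∧
            pvInb (field.length : Int) ((field.headD []).length : Int) x ∧
            pvGv field x.1 x.2 = some v := by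
    intro G
    induction G with
    | nil => intro acc hnd; exact ⟨hnd, by simp⟩
    | cons c G ih =>
      intro acc hnd
      obtain ⟨hnd1, hmem1⟩ := pvInner_spec field v c pvDirs acc hnd
      obtain ⟨hnd2, hmem2⟩ := ih _ hnd1
      refine ⟨hnd2, fun x => ?_⟩
      rw [List.foldl_cons, hmem2 x]
      rw [hmem1 x]
      constructor
      · rintro ((hx | ⟨d, hd, he⟩) | ⟨c', hc', he⟩)
        · exact Or.inl hx
        · exact Or.inr ⟨c, by simp, d, hd, he⟩
        · exact Or.inr ⟨c', List.mem_cons_of_mem _ hc', he⟩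
      · rintro (hx | ⟨c', hc', he⟩)
        · exact Or.inl (Or.inl hx)
        · rcases List.mem_cons.mp hc' with hc' | hc'
          · subst hc'; exact Or.inl (Or.inr he)
          · exact Or.inr ⟨c', hc', he⟩
  have heq : pvNextLayer field F v
      = F.foldl (fun acc c => pvDirs.foldl (pvStepFn field v c) acc) [] := rfl
  obtain ⟨h1, h2⟩ := key F [] List.nodup_nil
  exact ⟨heq ▸ h1, fun c' => by rw [heq, h2 c']; simp⟩

lemma pvCount9 (field : List (List Int)) :
    ∀ (F : List (Int × Int)) (s : Int), (∀ c ∈ F, pvGv field c.1 c.2 = some 9) →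
      F.foldl (fun s c => if pvGv field c.1 c.2 = some 9 then s + 1 else s) s
        = s + F.length := by
  intro F
  induction F with
  | nil => intro s _; simp
  | cons c rest ih =>
    intro s h9
    rw [List.foldl_cons, if_pos (h9 c (by simp))]
    rw [ih (s + 1) (fun c hc => h9 c (List.mem_cons_of_mem _ hc))]
    simp; ring

lemma pvAlt_fold (field : List (List Int)) :
    ∀ (n : Nat) (w : Int) (F : List (Int × Int)), w = 9 - (n : Int) →
      F.Nodup → (∀ c ∈ F, pvGv field c.1 c.2 = some w) →
      ((PySem.List.pyRange (w + 1) 10 1).foldl (pvNextLayer field) F).foldl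
          (fun s c => if pvGv field c.1 c.2 = some 9 then s + 1 else s) 0
        = pvClimb field (field.length : Int) ((field.headD []).length : Int) w F.toFinset := by
  intro n
  induction n with
  | zero =>
    intro w F hw hnd h9
    have hw9 : w = 9 := by push_cast at hw; omega
    subst hw9
    rw [PySem.List.pyRange_one_eq_nil (by omega)]
    rw [List.foldl_nil]
    rw [pvCount9 field F 0 h9]
    rw [pvClimb, if_pos rfl, List.toFinset_card_of_nodup hnd]
    omega
  | succ n ih =>
    intro w F hw hnd h9
    have hwlt : w < 9 := by push_cast at hw; omega
    rw [PySem.List.pyRange_one_cons (by omega), List.foldl_cons]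
    obtain ⟨hnd', hmem⟩ := pvNextLayer_spec field (w + 1) F
    rw [ih (w + 1) (pvNextLayer field F (w + 1)) (by push_cast at hw ⊢; omega) hnd'
      (fun c' hc' => by
        obtain ⟨c0, hc0, d, hd, he, hinb, hgz⟩ := (hmem c').mp hc'
        exact hgz)]
    have hstep : (pvNextLayer field F (w + 1)).toFinset
        = pvStep field (field.length : Int) ((field.headD []).length : Int) (w + 1)
            F.toFinset := by
      ext z
      rw [List.mem_toFinset, hmem z, mem_pvStep]
      constructor
      · rintro ⟨c0, hc0, d, hd, he, hinb, hgz⟩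
        exact ⟨hinb, ⟨c0, List.mem_toFinset.mpr hc0, d, hd, he⟩, hgz⟩
      · rintro ⟨hinb, ⟨c0, hc0, d, hd, he⟩, hgz⟩
        exact ⟨c0, List.mem_toFinset.mp hc0, d, hd, he, hinb, hgz⟩
    rw [hstep]
    conv_rhs => rw [pvClimb]
    rw [if_neg (show ¬ w = 9 by omega), if_neg (show ¬ 9 < w by omega)]

-- ===== VERDICT (by name: the statement is the Claim_ definition above) =====
lemma pvAll_card (yLn xLn : Nat) :
    (pvAll (yLn : Int) (xLn : Int)).card = yLn * xLn := by
  rw [pvAll, Finset.card_product, Int.card_Icc, Int.card_Icc,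
    show ((yLn : Int) - 1 + 1 - 0) = (yLn : Int) by ring,
    show ((xLn : Int) - 1 + 1 - 0) = (xLn : Int) by ring,
    Int.toNat_natCast, Int.toNat_natCast]

theorem bfs_spec : Claim_equal_bfs := by
  intro field startX startY _ hpre
  obtain ⟨hne, hrect, hsome⟩ := hpre
  unfold Spec_bfs
  obtain ⟨v0, hv0⟩ := Option.isSome_iff_exists.mp hsome
  cases field with
  | nil => exact absurd rfl hne
  | cons r0 tl =>
    simp only [bfs, bfs_alt, PySem.List.pyGet?_zero_cons, hv0]
    by_cases h9 : v0 = 9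
    · subst h9
      rw [pvLoop_nines (r0 :: tl) _ _ [(startY, startX)] _ [(startY, startX)] 0
        (by intro c hc; simp at hc; subst hc; exact hv0)
        (by simp only [List.length_cons, List.length_nil]
            exact Nat.lt_of_lt_of_le one_lt_two (Nat.le_add_left 2 _))]
      rw [PySem.List.pyRange_one_eq_nil (by omega)]
      simp [hv0]
    · have hA := pvLoop_eval (r0 :: tl) ((r0 :: tl).length : Int) (r0.length : Int)
        (2 * ((r0 :: tl).length * r0.length) + 2) v0
        [(startY, startX)] [] [(startY, startX)] ∅ 0 h9
        (by intro c hc; simp at hc; subst hc; exact hv0)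
        (by simp)
        (by simp)
        (by simp [pvStep_empty])
        List.nodup_nil
        (by
          intro c hc hg
          simp at hc
          subst hc
          rw [hv0] at hg
          exact absurd (Option.some.inj hg) (by omega))
        (by simp)
        (by
          intro c hc
          simp at hc
          subst hc
          exact ⟨v0, by omega, hv0⟩)
        (by
          have hcard : (pvAll ((r0 :: tl).length : Int) (r0.length : Int)).card
              = (r0 :: tl).length * r0.length := pvAll_card _ _
          have hle := Finset.card_le_card
            (Finset.sdiff_subset (s := pvAll ((r0 :: tl).length : Int) (r0.length : Int))
              (t := [((startY : Int), (startX : Int))].toFinset))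
          simp only [List.length_cons, List.length_nil] at hcard hle ⊢
          omega)
      simp only [List.append_nil] at hA
      rw [hA]
      by_cases hgt : 9 < v0
      · rw [pvClimb_gt hgt]
        rw [PySem.List.pyRange_one_eq_nil (by omega)]
        simp [hv0, h9]
      · have hB := pvAlt_fold (r0 :: tl) (9 - v0).toNat v0 [(startY, startX)]
          (by omega) (by simp)
          (by intro c hc; simp at hc; subst hc; exact hv0)
        rw [hB]
        simp
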